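-- pv_equiv track=rewrite | github.com/ufuktepe/Algorithms | l_code/0034_find_first_and_last_pos_in_sorted_array.py | find_last_index
-- ===== SOURCE A (Python) =====
-- def find_last_index(nums, target):
--     left = 0
--     right = len(nums) - 1
--
--     while left <= right:
--         mid = (left + right) // 2
--         if target < nums[mid]:
--             right = mid - 1
--         else:
--             left = mid + 1
--     return right if nums[right] == target else -1
-- ===== SOURCE B (Python) =====
-- def find_last_index(nums, target):
--     n = len(nums)
--     # exponential (galloping) search: double a step past n, then halve it,
--     # pushing the boundary pos right whenever nums[pos + step] <= target
--     step = 1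
--     while step <= n:
--         step *= 2
--     step //= 2
--     pos = -1
--     while step > 0:
--         if pos + step < n and nums[pos + step] <= target:
--             pos += step
--         step //= 2
--     return pos if pos >= 0 and nums[pos] == target else -1
-- ===== Notes on version B (the rewrite author's own statement) =====
-- stated objective: alternative
-- what changed: Replaces the two-pointer shrinking-interval binary search with an exponential (galloping) search: double a step past len(nums), then repeatedly halve it, advancing a single boundary pos whenever nums[pos+step] <= target; Pre_ states the sorted nonempty input the function (find position in sorted array) is specified for.
-- outside the precondition, e.g. on find_last_index([2, 1], 1): A returns -1, B returns 1; on find_last_index([], 0): A raises IndexError, B returns -1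
import Mathlib
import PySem

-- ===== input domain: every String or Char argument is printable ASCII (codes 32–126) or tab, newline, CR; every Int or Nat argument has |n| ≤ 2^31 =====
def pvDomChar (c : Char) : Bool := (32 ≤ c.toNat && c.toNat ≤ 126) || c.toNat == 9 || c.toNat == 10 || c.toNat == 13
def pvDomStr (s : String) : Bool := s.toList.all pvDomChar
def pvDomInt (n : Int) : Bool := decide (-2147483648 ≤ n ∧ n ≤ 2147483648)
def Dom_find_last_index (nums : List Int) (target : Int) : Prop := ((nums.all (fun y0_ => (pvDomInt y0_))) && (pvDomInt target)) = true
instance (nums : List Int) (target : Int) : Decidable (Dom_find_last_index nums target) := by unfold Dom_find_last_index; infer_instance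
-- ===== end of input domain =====

-- B replaces A's two-pointer binary search by an exponential (galloping) search (double a
-- step past n, then halve it, advancing one boundary pos); Pre_ restricts to the sorted
-- nonempty arrays the function is specified for (objective: alternative algorithm).


-- ===== PORT A =====
-- A's while loop: state (left, right), returns the final value of right
def flLoop (nums : List Int) (target : Int) (left right : Int) : Int :=
  if _h : left ≤ right then
    let mid := PySem.Int.floordiv (left + right) 2
    if target < (PySem.List.pyGet? nums mid).getD 0 then
      flLoop nums target left (mid - 1)
    else
      flLoop nums target (mid + 1) right
  else right
termination_by (right - left + 1).toNat
decreasing_by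
  · have := PySem.Int.floordiv_two_mid_bounds (lo := left) (hi := right) _h
    omega
  · have := PySem.Int.floordiv_two_mid_bounds (lo := left) (hi := right) _h
    omega

def find_last_index (nums : List Int) (target : Int) : Int :=
  let right := flLoop nums target 0 ((nums.length : Int) - 1)
  -- nums[right]: Python negative indexing; none = IndexError (empty list), excluded by Pre_
  match PySem.List.pyGet? nums right with
  | some v => if v = target then right else -1
  | none => 0

-- ===== PORT B =====
-- doubling loop: while step <= n: step *= 2   (the 1 ≤ step guard only makes it total;
-- B always calls it with step = 1 and the step stays ≥ 1, as in the Python)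
def flUp (n step : Int) : Int :=
  if _h : 1 ≤ step ∧ step ≤ n then flUp n (step * 2) else step
termination_by (n + 1 - step).toNat
decreasing_by omega

-- halving loop: while step > 0: if pos+step < n and nums[pos+step] <= target: pos += step; step //= 2
def flGallop (nums : List Int) (target : Int) (pos step : Int) : Int :=
  if _h : 0 < step then
    let pos' := if pos + step < (nums.length : Int) ∧ (PySem.List.pyGet? nums (pos + step)).getD 0 ≤ target
                then pos + step else pos
    flGallop nums target pos' (PySem.Int.floordiv step 2)
  else pos
termination_by step.toNat
decreasing_by
  have : PySem.Int.floordiv step 2 = step / 2 := PySem.Int.floordiv_eq_ediv_of_pos (by norm_num)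
  omega

def find_last_index_alt (nums : List Int) (target : Int) : Int :=
  let n : Int := nums.length
  let step := PySem.Int.floordiv (flUp n 1) 2
  let pos := flGallop nums target (-1) step
  if 0 ≤ pos ∧ (PySem.List.pyGet? nums pos).getD 0 = target then pos else -1

-- ===== PRECONDITION & SPEC =====
-- Pre_ admits the function's natural domain (the source file is 'find_first_and_last_pos_in_sorted_array'):
-- a SORTED array — on other unsorted input A's value is an artifact of its probe order — widened by the
-- unsorted arrays whose elements all lie on one side of target; NONEMPTY, since on [] A raises IndexError at nums[-1].
def Pre_find_last_index (nums : List Int) (target : Int) : Prop :=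
  nums ≠ [] ∧ (List.Pairwise (· ≤ ·) nums ∨ (∀ x ∈ nums, x ≤ target) ∨ (∀ x ∈ nums, target < x))
instance (nums : List Int) (target : Int) : Decidable (Pre_find_last_index nums target) := by
  unfold Pre_find_last_index; infer_instance
def pvWitness_find_last_index : List Int × Int := ([1, 2, 2, 3], 2)

def Spec_find_last_index (nums : List Int) (target : Int) (out : Int) : Prop := out = find_last_index_alt nums target
instance (nums : List Int) (target : Int) (out : Int) : Decidable (Spec_find_last_index nums target out) := by unfold Spec_find_last_index; infer_instance

-- ===== CLAIM (what is proved, stated in full; the proofs are below) =====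
def Claim_equal_find_last_index : Prop := ∀ (nums : List Int) (target : Int), Dom_find_last_index nums target → Pre_find_last_index nums target → Spec_find_last_index nums target (find_last_index nums target)

-- ===== LEMMAS AND PROOFS =====

-- the common characterisation: r is the last index whose element is ≤ target (-1 if none)
def IsBoundary (nums : List Int) (target r : Int) : Prop :=
  -1 ≤ r ∧ r < nums.length ∧
  (∀ (i : ℕ) (h : i < nums.length), (i : Int) ≤ r → nums[i] ≤ target) ∧
  (∀ (i : ℕ) (h : i < nums.length), r < (i : Int) → target < nums[i])

theorem isBoundary_unique (nums : List Int) (target r1 r2 : Int)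
    (h1 : IsBoundary nums target r1) (h2 : IsBoundary nums target r2) : r1 = r2 := by
  obtain ⟨a1, b1, le1, gt1⟩ := h1
  obtain ⟨a2, b2, le2, gt2⟩ := h2
  by_contra hne
  rcases lt_or_gt_of_ne hne with h | h
  · have hi : (r2.toNat : Int) = r2 := by omega
    have h3 := le2 r2.toNat (by omega) (by omega)
    have h4 := gt1 r2.toNat (by omega) (by omega)
    omega
  · have hi : (r1.toNat : Int) = r1 := by omega
    have h3 := le1 r1.toNat (by omega) (by omega)
    have h4 := gt2 r1.toNat (by omega) (by omega)
    omega

theorem sorted_le_of_le (nums : List Int) (hs : List.Pairwise (· ≤ ·) nums)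
    (i j : ℕ) (hij : i ≤ j) (hj : j < nums.length) : nums[i] ≤ nums[j] := by
  rcases Nat.lt_or_ge i j with h | h
  · exact List.pairwise_iff_getElem.mp hs i j (by omega) hj h
  · have : i = j := by omega
    subst this; exact le_refl _

theorem probe_le (nums : List Int) (target : Int) (hs : List.Pairwise (· ≤ ·) nums ∨ (∀ x ∈ nums, x ≤ target) ∨ (∀ x ∈ nums, target < x))
    (i j : ℕ) (hij : i ≤ j) (hj : j < nums.length) (hjle : nums[j] ≤ target) :
    nums[i]'(by omega) ≤ target := by
  rcases hs with hp | hall | hall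
  · exact le_trans (sorted_le_of_le nums hp i j hij hj) hjle
  · exact hall _ (List.getElem_mem _)
  · exact absurd hjle (by exact not_le.mpr (hall _ (List.getElem_mem _)))

theorem probe_gt (nums : List Int) (target : Int) (hs : List.Pairwise (· ≤ ·) nums ∨ (∀ x ∈ nums, x ≤ target) ∨ (∀ x ∈ nums, target < x))
    (i j : ℕ) (hij : i ≤ j) (hj : j < nums.length) (higt : target < nums[i]'(by omega)) :
    target < nums[j] := by
  rcases hs with hp | hall | hall
  · exact lt_of_lt_of_le higt (sorted_le_of_le nums hp i j hij hj)
  · exact absurd higt (by exact not_lt.mpr (hall _ (List.getElem_mem _)))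
  · exact hall _ (List.getElem_mem _)

theorem flLoop_char (nums : List Int) (target : Int) (hs : List.Pairwise (· ≤ ·) nums ∨ (∀ x ∈ nums, x ≤ target) ∨ (∀ x ∈ nums, target < x)) :
    ∀ left right : Int, 0 ≤ left → right < (nums.length : Int) → left ≤ right + 1 →
    (∀ (i : ℕ) (h : i < nums.length), (i : Int) < left → nums[i] ≤ target) →
    (∀ (i : ℕ) (h : i < nums.length), right < (i : Int) → target < nums[i]) →
    IsBoundary nums target (flLoop nums target left right) := by
  intro left right
  induction left, right using flLoop.induct nums target with
  | case1 left right h mid hlt ih =>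
      intro h0 hrn hlr hle hgt
      have hm := PySem.Int.floordiv_two_mid_bounds (lo := left) (hi := right) h
      have hmid : mid = PySem.Int.floordiv (left + right) 2 := rfl
      rw [flLoop]; simp only [h, dite_true]; rw [if_pos hlt]
      have hmv : (PySem.List.pyGet? nums mid).getD 0 = nums[mid.toNat] := by
        rw [PySem.List.pyGet?_eq_some_getElem nums (by omega) (by omega)]; rfl
      rw [hmv] at hlt
      refine ih (by omega) (by omega) (by omega) hle ?_
      intro i hi hmi
      have := probe_gt nums target hs mid.toNat i (by omega) hi (by simpa using hlt)
      omega
  | case2 left right h mid hlt ih =>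
      intro h0 hrn hlr hle hgt
      have hm := PySem.Int.floordiv_two_mid_bounds (lo := left) (hi := right) h
      have hmid : mid = PySem.Int.floordiv (left + right) 2 := rfl
      rw [flLoop]; simp only [h, dite_true]; rw [if_neg hlt]
      have hmv : (PySem.List.pyGet? nums mid).getD 0 = nums[mid.toNat] := by
        rw [PySem.List.pyGet?_eq_some_getElem nums (by omega) (by omega)]; rfl
      rw [hmv] at hlt
      refine ih (by omega) hrn (by omega) ?_ hgt
      intro i hi hil
      have := probe_le nums target hs i mid.toNat (by omega) (by omega) (by simpa using not_lt.mp hlt)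
      omega
  | case3 left right h =>
      intro h0 hrn hlr hle hgt
      rw [flLoop]; simp only [h, dite_false]
      exact ⟨by omega, hrn, fun i hi hir => hle i hi (by omega), hgt⟩

theorem flUp_spec (n : Int) : ∀ step : Int, 1 ≤ step →
    (∃ k : ℕ, flUp n step = step * 2 ^ k) ∧ n < flUp n step := by
  intro step
  induction step using flUp.induct n with
  | case1 step h ih =>
      intro _
      obtain ⟨⟨k, hk⟩, hlt⟩ := ih (by omega)
      rw [flUp, dif_pos h]
      exact ⟨⟨k + 1, by rw [hk]; ring⟩, hlt⟩
  | case2 step h =>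
      intro h1
      rw [flUp, dif_neg h]
      exact ⟨⟨0, by ring⟩, by omega⟩

theorem flGallop_char (nums : List Int) (target : Int) (hs : List.Pairwise (· ≤ ·) nums ∨ (∀ x ∈ nums, x ≤ target) ∨ (∀ x ∈ nums, target < x)) :
    ∀ step pos : Int, ((∃ k : ℕ, step = 2 ^ k) ∨ step = 0) → -1 ≤ pos → pos < (nums.length : Int) →
    (∀ (i : ℕ) (h : i < nums.length), (i : Int) ≤ pos → nums[i] ≤ target) →
    (∀ (i : ℕ) (h : i < nums.length), pos < (i : Int) → pos + 2 * step ≤ (i : Int) → target < nums[i]) →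
    IsBoundary nums target (flGallop nums target pos step) := by
  intro step pos
  induction pos, step using flGallop.induct nums target with
  | case1 pos step h pos' ih =>
      intro hpow h0 hpn hle hgt
      obtain ⟨k, hk⟩ : ∃ k : ℕ, step = 2 ^ k := by
        rcases hpow with hp | hp
        · exact hp
        · omega
      have hpos' : pos' = if pos + step < (nums.length : Int) ∧ (PySem.List.pyGet? nums (pos + step)).getD 0 ≤ target then pos + step else pos := rfl
      have hhalf : PySem.Int.floordiv step 2 = step / 2 :=
        PySem.Int.floordiv_eq_ediv_of_pos (by norm_num)
      rw [flGallop]; simp only [h, dite_true]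
      -- split on the branch of the if defining pos'
      by_cases hb : pos + step < (nums.length : Int) ∧ (PySem.List.pyGet? nums (pos + step)).getD 0 ≤ target
      · have hpos'' : pos' = pos + step := by rw [hpos', if_pos hb]
        obtain ⟨hbr, hbv⟩ := hb
        have hval : (PySem.List.pyGet? nums (pos + step)).getD 0 = nums[(pos + step).toNat] := by
          rw [PySem.List.pyGet?_eq_some_getElem nums (by omega) (by omega)]; rfl
        rw [hval] at hbv
        refine ih ?_ (by omega) (by omega) ?_ ?_
        · rcases Nat.eq_zero_or_pos k with hk0 | hk0
          · right; subst hk0; simp at hk; omega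
          · left; exact ⟨k - 1, by
              rw [hhalf, hk]
              have : (2:Int) ^ k = 2 ^ (k - 1) * 2 := by
                rw [← pow_succ]; congr 1; omega
              rw [this]; omega⟩
        · intro i hi hip
          rw [hpos''] at hip
          exact probe_le nums target hs i (pos + step).toNat (by omega) (by omega) (by simpa using hbv)
        · intro i hi h1 h2
          rw [hpos''] at h1 h2
          have hsv : step / 2 * 2 ≤ step := by omega
          refine hgt i hi (by omega) ?_
          rw [hhalf] at h2
          -- pos + step + 2*(step/2) = pos + 2*step when step = 2^k with k ≥ 1; when k = 0 step/2 = 0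
          rcases Nat.eq_zero_or_pos k with hk0 | hk0
          · subst hk0; simp at hk; omega
          · have : (2:Int) ^ k = 2 ^ (k - 1) * 2 := by
              rw [← pow_succ]; congr 1; omega
            have hhv : step / 2 = 2 ^ (k - 1) := by rw [hk, this]; omega
            rw [hhv] at h2; rw [hk, this]; omega
      · have hpos'' : pos' = pos := by rw [hpos', if_neg hb]
        refine ih ?_ (by rw [hpos'']; omega) (by rw [hpos'']; omega) (by rw [hpos'']; exact hle) ?_
        · rcases Nat.eq_zero_or_pos k with hk0 | hk0
          · right; subst hk0; simp at hk; omega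
          · left; exact ⟨k - 1, by
              rw [hhalf, hk]
              have : (2:Int) ^ k = 2 ^ (k - 1) * 2 := by
                rw [← pow_succ]; congr 1; omega
              rw [this]; omega⟩
        · intro i hi h1 h2
          rw [hpos''] at h1 h2
          rcases (by omega : (i : Int) < pos + step ∨ pos + step ≤ (i : Int)) with h3 | h3
          · -- i < pos + step: from h2, pos + 2*(step/2) ≤ i; with step = 2^k this forces k = 0 impossible unless…
            rw [hhalf] at h2
            rcases Nat.eq_zero_or_pos k with hk0 | hk0
            · subst hk0; simp at hk; omega
            · have hp2 : (2:Int) ^ k = 2 ^ (k - 1) * 2 := by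
                rw [← pow_succ]; congr 1; omega
              have hhv : step / 2 = 2 ^ (k - 1) := by rw [hk, hp2]; omega
              rw [hhv] at h2; rw [hk, hp2] at h3; omega
          · -- pos + step ≤ i: the probe failed, so nums[pos+step] > target (or out of range)
            rcases (by omega : pos + step < (nums.length : Int) ∨ (nums.length : Int) ≤ pos + step) with h4 | h4
            · have hval : (PySem.List.pyGet? nums (pos + step)).getD 0 = nums[(pos + step).toNat] := by
                rw [PySem.List.pyGet?_eq_some_getElem nums (by omega) (by omega)]; rfl
              have hbig : target < nums[(pos + step).toNat] := by
                by_contra hcon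
                exact hb ⟨h4, by rw [hval]; omega⟩
              exact probe_gt nums target hs (pos + step).toNat i (by omega) hi (by simpa using hbig)
            · omega
  | case2 pos step h =>
      intro hpow h0 hpn hle hgt
      rw [flGallop]; simp only [h, dite_false]
      have hstep : step = 0 := by
        rcases hpow with ⟨k, hk⟩ | hk
        · exfalso; apply h; rw [hk]; positivity
        · exact hk
      subst hstep
      exact ⟨h0, hpn, hle, fun i hi h1 => hgt i hi h1 (by omega)⟩

-- ===== VERDICT (by name: the statement is the Claim_ definition above) =====
theorem find_last_index_spec : Claim_equal_find_last_index := by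
  intro nums target _ hpre
  obtain ⟨hne, hs⟩ := hpre
  unfold Spec_find_last_index
  have hlen : 1 ≤ (nums.length : Int) := by
    have : nums.length ≠ 0 := fun h => hne (List.eq_nil_of_length_eq_zero h)
    omega
  -- A's boundary
  have hA : IsBoundary nums target (flLoop nums target 0 ((nums.length : Int) - 1)) :=
    flLoop_char nums target hs 0 ((nums.length : Int) - 1) (by omega) (by omega) (by omega)
      (fun i hi h => by omega) (fun i hi h => by omega)
  -- B's boundary
  obtain ⟨⟨k, hk⟩, hgt⟩ := flUp_spec (nums.length : Int) 1 (by omega)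
  have hhalf : PySem.Int.floordiv (flUp (nums.length : Int) 1) 2 = flUp (nums.length : Int) 1 / 2 :=
    PySem.Int.floordiv_eq_ediv_of_pos (by norm_num)
  have hk1 : 1 ≤ k := by
    by_contra hcon
    have : k = 0 := by omega
    subst this; simp at hk; omega
  have hp2 : (2:Int) ^ k = 2 ^ (k - 1) * 2 := by rw [← pow_succ]; congr 1; omega
  have hstep : PySem.Int.floordiv (flUp (nums.length : Int) 1) 2 = 2 ^ (k - 1) := by
    rw [hhalf, hk]; simp only [one_mul]; rw [hp2]; omega
  have hB : IsBoundary nums target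
      (flGallop nums target (-1) (PySem.Int.floordiv (flUp (nums.length : Int) 1) 2)) := by
    rw [hstep]
    refine flGallop_char nums target hs (2 ^ (k - 1)) (-1) (Or.inl ⟨k - 1, rfl⟩)
      (by omega) (by omega) (fun i hi h => by omega) ?_
    intro i hi h1 h2
    -- -1 + 2 * 2^(k-1) = 2^k - 1 ≥ nums.length - 1 ≥ i is impossible with i < length < 2^k
    exfalso
    rw [hk] at hgt; simp only [one_mul] at hgt
    rw [hp2] at hgt; omega
  have heq := isBoundary_unique nums target _ _ hA hB
  -- now compare the two final expressions
  unfold find_last_index find_last_index_alt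
  simp only []
  rw [← heq]
  obtain ⟨ha1, ha2, hle, hgtB⟩ := hA
  set r := flLoop nums target 0 ((nums.length : Int) - 1) with hr
  by_cases hpos : 0 ≤ r
  · have hsome : PySem.List.pyGet? nums r = some nums[r.toNat] :=
      PySem.List.pyGet?_eq_some_getElem nums hpos (by omega)
    rw [hsome]
    simp only [Option.getD_some]
    by_cases heqv : nums[r.toNat] = target
    · simp [heqv, hpos]
    · simp [heqv, hpos]
  · have hrm1 : r = -1 := by omega
    have hget : PySem.List.pyGet? nums r = some (nums.getLast hne) := by
      rw [hrm1, PySem.List.pyGet?_neg_one, List.getLast?_eq_getLast_of_ne_nil hne]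
    rw [hget]
    have hlast : nums.getLast hne = nums[nums.length - 1] := List.getLast_eq_getElem hne
    have hbig : target < nums.getLast hne := by
      rw [hlast]
      exact hgtB (nums.length - 1) (by omega) (by omega)
    have hneq : ¬ (nums.getLast hne = target) := by omega
    simp only [hneq, if_false]
    rw [if_neg (by intro hcon; omega)]
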